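-- pv_equiv track=rewrite | github.com/MchellMariscal/IN_IA | 02_Enfoque Probabilidad/002_Razonamiento Probabilístico/003_Manto de Markov.py | manto_de_markov
-- ===== SOURCE A (Python) =====
-- def manto_de_markov(grafo, nodo):
--     # Encontrar los padres: nodos que apuntan a 'nodo'
--     padres = [n for n, hijos in grafo.items() if nodo in hijos]  # Nodos que tienen a 'nodo' como hijo
--
--     # Encontrar los hijos: nodos a los que 'nodo' apunta
--     hijos = grafo.get(nodo, [])  # Nodos a los que 'nodo' apunta
--
--     # Encontrar los otros padres de los hijos (sin incluir al nodo mismo)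
--     padres_de_hijos = []  # Lista para los padres de los hijos
--     for hijo in hijos:  # Para cada hijo
--         padres_de_hijos.extend([n for n, hs in grafo.items() if hijo in hs and n != nodo])  # Nodos que tienen al hijo como hijo y no son el nodo
--
--     # Unir padres, hijos y padres de hijos (sin duplicados)
--     manto = set(padres + hijos + padres_de_hijos)  # Conjunto de nodos en el manto de Markov
--     return manto  # Devolvemos el manto de Markov
-- ===== SOURCE B (Python) =====
-- def manto_de_markov(grafo, nodo):
--     # Build a reverse-adjacency index once: child -> list of its parents.
--     rev = {}
--     for padre, hijos in grafo.items():
--         for h in dict.fromkeys(hijos):  # each (padre, h) edge counted once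
--             rev.setdefault(h, []).append(padre)
--
--     padres = rev.get(nodo, [])          # parents of nodo, by one lookup
--     hijos = grafo.get(nodo, [])         # children of nodo
--
--     manto = set(padres)
--     manto.update(hijos)
--     for h in hijos:
--         manto.update(p for p in rev.get(h, []) if p != nodo)
--     return manto
-- ===== Notes on version B (the rewrite author's own statement) =====
-- stated objective: alternative
-- what changed: B builds a reverse-adjacency index (child -> parents) in one pass over the graph and answers parents/co-parents by dictionary lookups, instead of A's rescan of all graph items for the node and again for every child.
import Mathlib
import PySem

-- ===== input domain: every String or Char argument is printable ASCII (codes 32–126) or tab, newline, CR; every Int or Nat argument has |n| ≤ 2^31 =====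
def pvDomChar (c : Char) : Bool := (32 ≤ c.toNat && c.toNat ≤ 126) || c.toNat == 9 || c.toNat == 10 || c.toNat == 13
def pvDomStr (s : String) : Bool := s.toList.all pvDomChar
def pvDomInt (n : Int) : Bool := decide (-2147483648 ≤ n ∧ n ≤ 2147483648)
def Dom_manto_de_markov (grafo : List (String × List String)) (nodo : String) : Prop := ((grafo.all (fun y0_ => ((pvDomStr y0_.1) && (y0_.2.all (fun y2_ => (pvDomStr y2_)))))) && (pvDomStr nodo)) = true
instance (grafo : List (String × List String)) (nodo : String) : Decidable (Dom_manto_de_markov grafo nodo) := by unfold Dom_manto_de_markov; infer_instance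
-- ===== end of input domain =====

-- B replaces A's per-child rescans of the graph items by a reverse-adjacency index built once and looked up (objective: alternative).

-- ===== PORT A =====
def manto_de_markov (grafo : List (String × List String)) (nodo : String) : List String :=
  let d := PySem.Dict.ofList grafo
  -- padres = [n for n, hijos in grafo.items() if nodo in hijos]
  let padres := (d.items.filter (fun p => p.2.contains nodo)).map (·.1)
  -- hijos = grafo.get(nodo, [])
  let hijos := d.getD nodo []
  -- for hijo in hijos: padres_de_hijos.extend([n for n, hs in grafo.items() if hijo in hs and n != nodo])
  let padres_de_hijos := hijos.foldl (fun acc hijo =>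
    acc ++ ((d.items.filter (fun p => p.2.contains hijo && !(p.1 == nodo))).map (·.1))) []
  -- manto = set(padres + hijos + padres_de_hijos)
  PySem.Set.ofList (padres ++ hijos ++ padres_de_hijos)

-- ===== PORT B =====
def manto_de_markov_alt (grafo : List (String × List String)) (nodo : String) : List String :=
  let d := PySem.Dict.ofList grafo
  -- rev = {}; for padre, hijos in grafo.items(): for h in dict.fromkeys(hijos): rev.setdefault(h, []).append(padre)
  let rev := d.items.foldl (fun r p =>
    (PySem.List.dedup p.2).foldl (fun r h => r.modify h [] (· ++ [p.1])) r)
    (PySem.Dict.empty : PySem.Dict String (List String))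
  -- padres = rev.get(nodo, []); hijos = grafo.get(nodo, [])
  let padres := rev.getD nodo []
  let hijos := d.getD nodo []
  -- manto = set(padres); manto.update(hijos)
  let manto := PySem.Set.update (PySem.Set.ofList padres) hijos
  -- for h in hijos: manto.update(p for p in rev.get(h, []) if p != nodo)
  hijos.foldl (fun s h => PySem.Set.update s ((rev.getD h []).filter (fun p => !(p == nodo)))) manto

-- ===== PRECONDITION & SPEC =====
def Spec_manto_de_markov (grafo : List (String × List String)) (nodo : String) (out : List String) : Prop := out = manto_de_markov_alt grafo nodo
instance (grafo : List (String × List String)) (nodo : String) (out : List String) : Decidable (Spec_manto_de_markov grafo nodo out) := by unfold Spec_manto_de_markov; infer_instance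

-- ===== CLAIM (what is proved, stated in full; the proofs are below) =====
def Claim_equal_manto_de_markov : Prop := ∀ (grafo : List (String × List String)) (nodo : String), Dom_manto_de_markov grafo nodo → Spec_manto_de_markov grafo nodo (manto_de_markov grafo nodo)

-- ===== LEMMAS AND PROOFS =====

-- On a Nodup list, filtering for equality with c keeps exactly c (once) if present.
theorem filter_beq_nodup {α : Type} [BEq α] [LawfulBEq α] (l : List α) (c : α) (h : l.Nodup) :
    l.filter (fun x => x == c) = if c ∈ l then [c] else [] := by
  rw [List.filter_beq]
  by_cases hc : c ∈ l
  · simp [hc, List.count_eq_one_of_mem h hc]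
  · simp [hc, List.count_eq_zero_of_not_mem hc]

-- The edge list of one item, restricted to child c, contributes its parent iff c is among its children.
theorem edges_one_item {p : String × List String} {c : String} :
    ((PySem.List.dedup p.2).map (fun h => (h, p.1))).filter (fun q => q.1 == c)
      = if p.2.contains c then [(c, p.1)] else [] := by
  rw [List.filter_map]
  have : ((fun q : String × String => q.1 == c) ∘ fun h => (h, p.1)) = fun h => h == c := rfl
  rw [this, filter_beq_nodup _ c (PySem.List.nodup_dedup p.2)]

  by_cases hc : c ∈ p.2
  · simp [hc]
  · simp [hc]

-- The full edge list, restricted to child c, maps to A's scan of the items for parents of c.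
theorem edges_filter (l : List (String × List String)) (c : String) :
    ((l.flatMap (fun p => (PySem.List.dedup p.2).map (fun h => (h, p.1)))).filter
        (fun q => q.1 == c)).map (·.2)
    = (l.filter (fun p => p.2.contains c)).map (·.1) := by
  induction l with
  | nil => rfl
  | cons p t ih =>
    rw [List.flatMap_cons, List.filter_append, List.map_append, ih, edges_one_item]
    by_cases hc : c ∈ p.2
    · simp [hc]
    · simp [hc]

-- Lookup in B's reverse index = A's scan of the items for parents of c.
theorem rev_getD (l : List (String × List String)) (c : String) :
    (l.foldl (fun r p =>
        (PySem.List.dedup p.2).foldl (fun r h => r.modify h [] (· ++ [p.1])) r)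
      (PySem.Dict.empty : PySem.Dict String (List String))).getD c []
    = (l.filter (fun p => p.2.contains c)).map (·.1) := by
  have hfold :
      (l.foldl (fun r p =>
          (PySem.List.dedup p.2).foldl (fun r h => r.modify h [] (· ++ [p.1])) r)
        (PySem.Dict.empty : PySem.Dict String (List String)))
      = ((l.flatMap (fun p => (PySem.List.dedup p.2).map (fun h => (h, p.1)))).foldl
          (fun r q => r.modify q.1 [] (· ++ [q.2])) PySem.Dict.empty) := by
    rw [List.foldl_flatMap]
    congr 1
    funext r p
    rw [List.foldl_map]
  rw [hfold, PySem.Dict.getD_foldl_modify_append]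
  rw [PySem.Dict.getD_empty, List.nil_append, edges_filter]

-- set.update distributed over a flatMap = the per-element update loop.
theorem update_flatMap {α β : Type} [BEq α] (f : β → List α) (l : List β) (s : PySem.Set α) :
    PySem.Set.update s (l.flatMap f) = l.foldl (fun s h => PySem.Set.update s (f h)) s := by
  induction l generalizing s with
  | nil => rfl
  | cons h t ih => rw [List.flatMap_cons, PySem.Set.update_append, List.foldl_cons, ih]

-- ===== VERDICT (by name: the statement is the Claim_ definition above) =====
theorem manto_de_markov_spec : Claim_equal_manto_de_markov := by
  intro grafo nodo _
  unfold Spec_manto_de_markov manto_de_markov manto_de_markov_alt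
  simp only [rev_getD]
  rw [PySem.List.foldl_append_eq_flatMap, List.nil_append,
      PySem.Set.ofList_append, PySem.Set.ofList_append, update_flatMap]
  congr 1
  funext s h
  congr 1
  rw [List.filter_map]
  have : ((fun x : String => !(x == nodo)) ∘ (·.1 : String × List String → String))
      = fun p : String × List String => !(p.1 == nodo) := rfl
  rw [this, List.filter_filter]
  congr 1
  exact List.filter_congr (fun p _ => Bool.and_comm _ _)
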